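-- pv_equiv track=rewrite | github.com/FordyceLab/RunPack | runpack/taskscheduler.py | busyPeriods
-- ===== SOURCE A (Python) =====
-- def busyPeriods(delayTimes, scanTime, device):
--     """
--     Given a series of delay times between assays, determines a series of duty cycle
--     start/stop times for the camera/scope. The first delay represents a T0 assay and a T1 assay (2 assays)
--
--     Arguments:
--
--         (list) delayTimes: time delays between chip imagings
--         (int) scanTime: estimated length of scope/stage duty cycle for assay
--         (str) device: name of device (e.g., 'd1')
--
--     Returns:
--         (list) busyTimes: duty cycle start/stop times for the camera/scope as [(start1,
--         stop1, deviceName), (start2, stop2, deviceName), ... (startn, stopn, deviceName)]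
--
--     """
--
--     busyTimes = []
--     startTime = 0
--     for delay in delayTimes:
--         busyTimes.append((startTime, startTime+scanTime, device))
--         startTime += delay
--     busyTimes.append((startTime, startTime+scanTime, device))
--     return busyTimes
-- ===== SOURCE B (Python) =====
-- def busyPeriods(delayTimes, scanTime, device):
--     # Build the schedule back-to-front: start from the total delay (the last
--     # window's start), walk the delays in reverse subtracting each, collecting
--     # windows in reverse order, then reverse once at the end.
--     end = sum(delayTimes)
--     out = [(end, end + scanTime, device)]
--     for delay in reversed(delayTimes):
--         end -= delay
--         out.append((end, end + scanTime, device))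
--     out.reverse()
--     return out
-- ===== Notes on version B (the rewrite author's own statement) =====
-- stated objective: alternative
-- what changed: B builds the schedule back-to-front: it first computes the total delay with sum(), then traverses the delays in REVERSE, subtracting each delay to recover earlier start times while collecting windows in reverse order, and reverses the list once at the end, instead of A's forward running-sum-and-append loop.
import Mathlib
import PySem

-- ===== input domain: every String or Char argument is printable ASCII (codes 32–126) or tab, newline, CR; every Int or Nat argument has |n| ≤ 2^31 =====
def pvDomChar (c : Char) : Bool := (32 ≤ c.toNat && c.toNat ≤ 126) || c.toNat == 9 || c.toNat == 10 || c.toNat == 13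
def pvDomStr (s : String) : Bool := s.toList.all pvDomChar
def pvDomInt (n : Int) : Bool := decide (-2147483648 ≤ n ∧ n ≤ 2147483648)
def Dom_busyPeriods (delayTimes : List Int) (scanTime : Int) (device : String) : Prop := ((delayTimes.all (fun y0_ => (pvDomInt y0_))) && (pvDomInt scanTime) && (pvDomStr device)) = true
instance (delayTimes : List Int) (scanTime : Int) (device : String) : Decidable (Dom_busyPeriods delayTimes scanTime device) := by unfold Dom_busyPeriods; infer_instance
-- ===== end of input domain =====

-- B builds the same windows back-to-front (total delay via sum(), reverse walk subtracting delays, final reverse) instead of A's forward running-sum loop; alternative decomposition, same O(n) cost.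


-- ===== PORT A =====
-- A's loop: emit the current window, advance startTime by the delay; one final window after the loop
def busyPeriodsGo (scanTime : Int) (device : String) (startTime : Int) : List Int → List (Int × Int × String)
  | [] => [(startTime, startTime + scanTime, device)]
  | delay :: rest => (startTime, startTime + scanTime, device) :: busyPeriodsGo scanTime device (startTime + delay) rest

def busyPeriods (delayTimes : List Int) (scanTime : Int) (device : String) : List (Int × Int × String) :=
  busyPeriodsGo scanTime device 0 delayTimes

-- ===== PORT B =====
-- Python's sum(delayTimes)
def sumPy (l : List Int) : Int := l.foldl (· + ·) 0

-- B: end = sum(delayTimes); out = [last window]; for delay in reversed(delayTimes): end -= delay; append window; out.reverse()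
def busyPeriods_alt (delayTimes : List Int) (scanTime : Int) (device : String) : List (Int × Int × String) :=
  (delayTimes.reverse.foldl
    (fun (st : Int × List (Int × Int × String)) delay =>
      (st.1 - delay, st.2 ++ [(st.1 - delay, st.1 - delay + scanTime, device)]))
    (sumPy delayTimes, (sumPy delayTimes, sumPy delayTimes + scanTime, device) :: [])).2.reverse

-- ===== PRECONDITION & SPEC =====
def Spec_busyPeriods (delayTimes : List Int) (scanTime : Int) (device : String) (out : List (Int × Int × String)) : Prop := out = busyPeriods_alt delayTimes scanTime device
instance (delayTimes : List Int) (scanTime : Int) (device : String) (out : List (Int × Int × String)) : Decidable (Spec_busyPeriods delayTimes scanTime device out) := by unfold Spec_busyPeriods; infer_instance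

-- ===== CLAIM (what is proved, stated in full; the proofs are below) =====
def Claim_equal_busyPeriods : Prop := ∀ (delayTimes : List Int) (scanTime : Int) (device : String), Dom_busyPeriods delayTimes scanTime device → Spec_busyPeriods delayTimes scanTime device (busyPeriods delayTimes scanTime device)

-- ===== LEMMAS AND PROOFS =====

theorem sumPy_eq_sum (l : List Int) : sumPy l = l.sum := by
  have h : ∀ (l : List Int) (a : Int), l.foldl (· + ·) a = a + l.sum := by
    intro l
    induction l with
    | nil => intro a; simp
    | cons d rest ih => intro a; simp [List.foldl, ih, List.sum_cons]; ring
  simpa [sumPy] using h l 0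

theorem goA_ne_nil (scanTime : Int) (device : String) (c : Int) (ds : List Int) :
    busyPeriodsGo scanTime device c ds ≠ [] := by
  cases ds <;> simp [busyPeriodsGo]

-- invariant of B's reverse loop: starting at c + sum ds, folding over ds.reverse lands on c and
-- appends, in reverse start order, all windows of A except the last one
theorem loopB (scanTime : Int) (device : String) :
    ∀ (ds : List Int) (c : Int) (acc : List (Int × Int × String)),
      ds.reverse.foldl
        (fun (st : Int × List (Int × Int × String)) delay =>
          (st.1 - delay, st.2 ++ [(st.1 - delay, st.1 - delay + scanTime, device)]))
        (c + ds.sum, acc)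
      = (c, acc ++ ((busyPeriodsGo scanTime device c ds).dropLast).reverse) := by
  intro ds
  induction ds with
  | nil => intro c acc; simp [busyPeriodsGo]
  | cons d rest ih =>
    intro c acc
    have hsum : c + (d :: rest).sum = (c + d) + rest.sum := by
      simp [List.sum_cons]; ring
    have hstep := ih (c + d) acc
    have hne := goA_ne_nil scanTime device (c + d) rest
    simp only [List.reverse_cons, List.foldl_append, hsum, hstep, List.foldl_cons, List.foldl_nil]
    have hc : c + d - d = c := by ring
    simp [busyPeriodsGo, List.dropLast_cons_of_ne_nil hne, List.append_assoc, hc]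

theorem goA_snoc (scanTime : Int) (device : String) :
    ∀ (ds : List Int) (c : Int),
      (busyPeriodsGo scanTime device c ds).dropLast
        ++ [(c + ds.sum, c + ds.sum + scanTime, device)]
      = busyPeriodsGo scanTime device c ds := by
  intro ds
  induction ds with
  | nil => intro c; simp [busyPeriodsGo]
  | cons d rest ih =>
    intro c
    have hne := goA_ne_nil scanTime device (c + d) rest
    have h := ih (c + d)
    simp only [busyPeriodsGo, List.dropLast_cons_of_ne_nil hne, List.cons_append, List.sum_cons]
    rw [show c + (d + rest.sum) = (c + d) + rest.sum by ring, h]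

-- ===== VERDICT (by name: the statement is the Claim_ definition above) =====
theorem busyPeriods_spec : Claim_equal_busyPeriods := by
  intro delayTimes scanTime device _
  unfold Spec_busyPeriods busyPeriods busyPeriods_alt
  have h := loopB scanTime device delayTimes 0
    [(sumPy delayTimes, sumPy delayTimes + scanTime, device)]
  rw [sumPy_eq_sum] at *
  simp only [zero_add] at h
  rw [h]
  simp only [List.reverse_append, List.reverse_reverse, List.reverse_singleton]
  have := goA_snoc scanTime device delayTimes 0
  simpa using this.symm
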